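-- pv_equiv track=rewrite | github.com/adamritter/lazyviewer | lazyviewer/render/__init__.py | _source_line_display_index
-- ===== SOURCE A (Python) =====
-- def _source_line_display_index(text_lines: list[str], source_line: int, wrap_text: bool) -> int | None:
--     if not text_lines:
--         return None
--
--     target = max(1, source_line)
--     if not wrap_text:
--         idx = target - 1
--         if 0 <= idx < len(text_lines):
--             return idx
--         return None
--
--     current_source = 1
--     for idx, line in enumerate(text_lines):
--         if current_source >= target:
--             return idx
--         if _line_has_newline_terminator(line):
--             current_source += 1
--     return None
--
-- def _line_has_newline_terminator(line: str) -> bool: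
--     return line.endswith("\n") or line.endswith("\r")
-- ===== SOURCE B (Python) =====
-- def _source_line_display_index(text_lines: list[str], source_line: int, wrap_text: bool) -> int | None:
--     if not text_lines:
--         return None
--     target = max(1, source_line)
--     if not wrap_text:
--         idx = target - 1
--         return idx if 0 <= idx < len(text_lines) else None
--     if target == 1:
--         return 0
--     breaks = [i for i, line in enumerate(text_lines)
--               if line.endswith("\n") or line.endswith("\r")]
--     k = target - 2
--     if k < len(breaks):
--         pos = breaks[k] + 1
--         return pos if pos < len(text_lines) else None
--     return None
-- ===== Notes on version B (the rewrite author's own statement) =====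
-- stated objective: alternative
-- what changed: Replaces the incremental scan that tracks a running source-line counter with a one-shot table of newline-terminator positions followed by a direct O(1) indexed lookup (target-2 into the table).
import Mathlib
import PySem

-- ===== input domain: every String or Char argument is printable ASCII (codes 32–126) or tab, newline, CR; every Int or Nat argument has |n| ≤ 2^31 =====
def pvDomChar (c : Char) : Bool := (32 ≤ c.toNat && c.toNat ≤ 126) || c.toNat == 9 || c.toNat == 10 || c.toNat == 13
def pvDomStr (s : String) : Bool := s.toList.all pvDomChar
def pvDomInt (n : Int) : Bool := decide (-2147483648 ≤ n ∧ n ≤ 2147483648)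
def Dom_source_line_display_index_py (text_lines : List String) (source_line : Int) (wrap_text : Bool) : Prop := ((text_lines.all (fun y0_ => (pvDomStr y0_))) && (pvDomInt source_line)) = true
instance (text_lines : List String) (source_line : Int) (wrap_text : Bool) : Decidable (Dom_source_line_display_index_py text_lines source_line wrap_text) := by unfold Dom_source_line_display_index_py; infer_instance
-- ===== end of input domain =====

-- B replaces A's incremental scan-with-counter by a break-position table plus a direct indexed lookup (alternative decomposition; return value only).

-- ===== PORT A =====
-- _line_has_newline_terminator
def lineHasNewlineTerminator (line : String) : Bool :=
  PySem.Str.endswith line "\n" || PySem.Str.endswith line "\r"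

-- the 'for idx, line in enumerate(text_lines)' loop of A
def aLoop (lines : List String) (idx : Int) (currentSource : Int) (target : Int) : Option Int :=
  match lines with
  | [] => none
  | l :: rest =>
    if currentSource ≥ target then some idx
    else aLoop rest (idx + 1) (if lineHasNewlineTerminator l then currentSource + 1 else currentSource) target

def source_line_display_index_py (text_lines : List String) (source_line : Int) (wrap_text : Bool) : Option Int :=
  if text_lines = [] then none
  else
    let target := max 1 source_line
    if ¬ wrap_text then
      let idx := target - 1
      if 0 ≤ idx ∧ idx < (text_lines.length : Int) then some idx else none
    else
      aLoop text_lines 0 1 target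

-- ===== PORT B =====
-- the breaks comprehension of B: indices of lines ending in '\n' or '\r' (counter = enumerate index)
def bBreaks (lines : List String) (i : Int) : List Int :=
  match lines with
  | [] => []
  | l :: rest =>
    if PySem.Str.endswith l "\n" || PySem.Str.endswith l "\r" then i :: bBreaks rest (i + 1)
    else bBreaks rest (i + 1)

def source_line_display_index_py_alt (text_lines : List String) (source_line : Int) (wrap_text : Bool) : Option Int :=
  if text_lines = [] then none
  else
    let target := max 1 source_line
    if ¬ wrap_text then
      let idx := target - 1
      if 0 ≤ idx ∧ idx < (text_lines.length : Int) then some idx else none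
    else if target = 1 then some 0
    else
      let breaks := bBreaks text_lines 0
      let k := target - 2
      if k < (breaks.length : Int) then
        match breaks[k.toNat]? with
        | some p =>
          let pos := p + 1
          if pos < (text_lines.length : Int) then some pos else none
        | none => none
      else none

-- ===== PRECONDITION & SPEC =====
def Spec_source_line_display_index_py (text_lines : List String) (source_line : Int) (wrap_text : Bool) (out : Option Int) : Prop := out = source_line_display_index_py_alt text_lines source_line wrap_text
instance (text_lines : List String) (source_line : Int) (wrap_text : Bool) (out : Option Int) : Decidable (Spec_source_line_display_index_py text_lines source_line wrap_text out) := by unfold Spec_source_line_display_index_py; infer_instance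

-- ===== CLAIM (what is proved, stated in full; the proofs are below) =====
def Claim_equal_source_line_display_index_py : Prop := ∀ (text_lines : List String) (source_line : Int) (wrap_text : Bool), Dom_source_line_display_index_py text_lines source_line wrap_text → Spec_source_line_display_index_py text_lines source_line wrap_text (source_line_display_index_py text_lines source_line wrap_text)

-- ===== LEMMAS AND PROOFS =====

theorem bBreaks_shift (lines : List String) : ∀ i : Int, bBreaks lines (i + 1) = (bBreaks lines i).map (· + 1) := by
  induction lines with
  | nil => intro i; simp [bBreaks]
  | cons l rest ih =>
    intro i
    simp only [bBreaks]
    split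
    · simp [ih (i + 1)]
    · exact ih (i + 1)

theorem aLoop_ge (lines : List String) (idx cur target : Int) (h : target ≤ cur) :
    aLoop lines idx cur target = if lines = [] then none else some idx := by
  cases lines with
  | nil => simp [aLoop]
  | cons l rest => simp [aLoop, h]

theorem aLoop_eq_breaks (lines : List String) : ∀ (k : Nat) (idx cur : Int),
    aLoop lines idx cur (cur + (k : Int) + 1) =
      match (bBreaks lines 0)[k]? with
      | some p => if p + 1 < (lines.length : Int) then some (idx + p + 1) else none
      | none => none := by
  induction lines with
  | nil => intro k idx cur; simp [aLoop, bBreaks]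
  | cons l rest ih =>
    intro k idx cur
    have hterm : lineHasNewlineTerminator l =
        (PySem.Str.endswith l "\n" || PySem.Str.endswith l "\r") := rfl
    have hlt : ¬ (cur ≥ cur + (k : Int) + 1) := by omega
    by_cases hl : (PySem.Str.endswith l "\n" || PySem.Str.endswith l "\r") = true
    · -- l has a terminator: breaks head is 0
      cases k with
      | zero =>
        simp only [aLoop, hterm, hl, bBreaks, Nat.cast_zero, add_zero, if_true]
        rw [aLoop_ge rest (idx + 1) (cur + 1) (cur + 1) (by omega)]
        cases rest with
        | nil => simp
        | cons r rs => simp; try omega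
      | succ k' =>
        simp only [aLoop, hlt, hterm, hl, bBreaks, if_true, if_false]
        have hc : cur + ((k' : Int) + 1) + 1 = (cur + 1) + (k' : Int) + 1 := by push_cast; ring
        rw [show ((k' + 1 : Nat) : Int) = (k' : Int) + 1 by push_cast; ring, hc,
            ih k' (idx + 1) (cur + 1)]
        rw [bBreaks_shift rest 0]
        simp only [List.getElem?_cons_succ, List.getElem?_map]
        cases h : (bBreaks rest 0)[k']? with
        | none => simp
        | some p =>
          simp only [Option.map_some]
          by_cases hp : p + 1 < (rest.length : Int)
          · rw [if_pos hp, if_pos (by simp; omega)]; congr 1; ring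
          · rw [if_neg hp, if_neg (by simp; omega)]
    · -- no terminator
      simp only [aLoop, hlt, hterm, hl, bBreaks, Bool.false_eq_true, if_false]
      rw [ih k (idx + 1) cur]
      rw [bBreaks_shift rest 0]
      simp only [List.getElem?_map]
      cases h : (bBreaks rest 0)[k]? with
      | none => simp
      | some p =>
        simp only [Option.map_some]
        by_cases hp : p + 1 < (rest.length : Int)
        · rw [if_pos hp, if_pos (by simp; omega)]; congr 1; ring
        · rw [if_neg hp, if_neg (by simp; omega)]

-- ===== VERDICT (by name: the statement is the Claim_ definition above) =====
theorem source_line_display_index_py_spec : Claim_equal_source_line_display_index_py := by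
  intro text_lines source_line wrap_text _
  unfold Spec_source_line_display_index_py source_line_display_index_py source_line_display_index_py_alt
  by_cases hnil : text_lines = []
  · simp [hnil]
  · simp only [if_neg hnil]
    by_cases hw : wrap_text
    · rw [if_neg (show ¬¬wrap_text = true by simp [hw]), if_neg (show ¬¬wrap_text = true by simp [hw])]
      set target := max 1 source_line with htarget
      have h1 : 1 ≤ target := le_max_left _ _
      by_cases h2 : target = 1
      · rw [if_pos h2, aLoop_ge text_lines 0 1 target (by omega), if_neg hnil]
      · rw [if_neg h2]
        have hk : target = 1 + ((target - 2).toNat : Int) + 1 := by omega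
        have hA := aLoop_eq_breaks text_lines (target - 2).toNat 0 1
        rw [← hk] at hA
        rw [hA]
        have hkn : ((target - 2).toNat : Int) = target - 2 := by omega
        by_cases hlen : target - 2 < ((bBreaks text_lines 0).length : Int)
        · rw [if_pos hlen]
          cases h : (bBreaks text_lines 0)[(target - 2).toNat]? with
          | none =>
            exfalso
            rw [List.getElem?_eq_none_iff] at h
            omega
          | some p => simp
        · rw [if_neg hlen]
          have hge : (bBreaks text_lines 0).length ≤ (target - 2).toNat := by omega
          rw [List.getElem?_eq_none hge]
    · simp [hw]
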